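-- pv_equiv track=rewrite | github.com/youmikimm/problem-solved | 프로그래머스/lv1/17681. ［1차］ 비밀지도/［1차］ 비밀지도.py | solution
-- ===== SOURCE A (Python) =====
-- def solution(n, arr1, arr2):
--     answer = []
--
--     for i in range(n):
--         encodedString = str(bin(arr1[i] | arr2[i]))[2:].rjust(n, '0')
--         decodedString = ""
--         for j in range(len(encodedString)):
--             if encodedString[j] == '0':
--                 decodedString += " "
--             else:
--                 decodedString += "#"
--         answer.append(decodedString)
--
--     return answer
-- ===== SOURCE B (Python) =====
-- def solution(n, arr1, arr2):
--     return [' '.join('#' * len(run)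
--                      for run in bin(arr1[i] | arr2[i])[2:].zfill(n).split('0'))
--             for i in range(n)]
-- ===== Notes on version B (the rewrite author's own statement) =====
-- stated objective: idiomatic
-- what changed: B is a one-expression comprehension that zero-pads with str.zfill and renders each row by run-length decomposition — split the bit string on '0' and join runs of '#' — instead of A's explicit loop that rjust-pads and appends one character per position through an if/else; Pre_ excludes only arrays shorter than n, on which A raises IndexError.
import Mathlib
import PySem

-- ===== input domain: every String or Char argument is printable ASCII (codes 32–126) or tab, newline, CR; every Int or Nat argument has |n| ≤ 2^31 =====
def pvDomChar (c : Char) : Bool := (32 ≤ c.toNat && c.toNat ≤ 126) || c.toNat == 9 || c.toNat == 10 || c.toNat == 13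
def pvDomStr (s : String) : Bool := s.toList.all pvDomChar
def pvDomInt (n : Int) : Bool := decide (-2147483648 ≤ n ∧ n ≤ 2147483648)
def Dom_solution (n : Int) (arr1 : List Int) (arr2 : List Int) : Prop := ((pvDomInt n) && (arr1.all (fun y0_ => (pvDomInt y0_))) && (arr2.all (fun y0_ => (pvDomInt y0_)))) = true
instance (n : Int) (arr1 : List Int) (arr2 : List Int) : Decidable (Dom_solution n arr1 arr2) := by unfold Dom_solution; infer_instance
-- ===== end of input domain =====

-- B builds each row by zero-filling the bit string with zfill, splitting it on '0'
-- and joining the runs as '#'-blocks, instead of A's per-character loop over a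
-- rjust'ed string; return-value equivalence wherever A returns.

-- ===== PORT A =====
-- exact port of str.rjust(w, fill): pad on the left up to width w
def rjustChars (cs : List Char) (w : Int) (fill : Char) : List Char :=
  List.replicate (w - cs.length).toNat fill ++ cs

-- the body of A's inner loop: '0' ↦ ' ', anything else ↦ '#'
def decChar (c : Char) : Char := if c = '0' then ' ' else '#'

def solution (n : Int) (arr1 : List Int) (arr2 : List Int) : List String :=
  (PySem.List.pyRange 0 n 1).map (fun i =>
    let enc := rjustChars
      (PySem.List.slice
        (PySem.Int.toBinChars0b
          (PySem.Int.bor (PySem.List.pyGetD arr1 i 0) (PySem.List.pyGetD arr2 i 0)))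
        (some 2) none) n '0'
    String.ofList (enc.map decChar))

-- ===== PORT B =====
def solution_alt (n : Int) (arr1 : List Int) (arr2 : List Int) : List String :=
  (PySem.List.pyRange 0 n 1).map (fun i =>
    String.ofList (PySem.Chars.join [' ']
      ((PySem.Chars.splitOn
          (PySem.Chars.zfill
            (PySem.List.slice
              (PySem.Int.toBinChars0b
                (PySem.Int.bor (PySem.List.pyGetD arr1 i 0) (PySem.List.pyGetD arr2 i 0)))
              (some 2) none) n)
          ['0']).map (fun run => List.replicate run.length '#'))))

-- ===== PRECONDITION & SPEC =====
-- Pre_ excludes exactly the inputs on which A raises IndexError: arrays shorter than n.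
def Pre_solution (n : Int) (arr1 : List Int) (arr2 : List Int) : Prop :=
  n ≤ arr1.length ∧ n ≤ arr2.length
instance (n : Int) (arr1 : List Int) (arr2 : List Int) : Decidable (Pre_solution n arr1 arr2) := by
  unfold Pre_solution; infer_instance

def pvWitness_solution : Int × List Int × List Int := (2, [2, 1], [1, 1])

def Spec_solution (n : Int) (arr1 : List Int) (arr2 : List Int) (out : List String) : Prop :=
  out = solution_alt n arr1 arr2
instance (n : Int) (arr1 : List Int) (arr2 : List Int) (out : List String) : Decidable (Spec_solution n arr1 arr2 out) := by
  unfold Spec_solution; infer_instance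

-- ===== CLAIM (what is proved, stated in full; the proofs are below) =====
def Claim_equal_solution : Prop := ∀ (n : Int) (arr1 : List Int) (arr2 : List Int), Dom_solution n arr1 arr2 → Pre_solution n arr1 arr2 → Spec_solution n arr1 arr2 (solution n arr1 arr2)

-- ===== LEMMAS AND PROOFS =====

def mySplit : List Char → List Char → List (List Char)
  | pre, [] => [pre]
  | pre, c :: t => if c = '0' then pre :: mySplit [] t else mySplit (pre ++ [c]) t

lemma mySplit_ne_nil (pre l : List Char) : mySplit pre l ≠ [] := by
  induction l generalizing pre with
  | nil => simp [mySplit]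
  | cons c t ih =>
    by_cases h : c = '0' <;> simp [mySplit, h, ih]

lemma go_eq (fuel : Nat) : ∀ (l cur : List Char) (acc : List (List Char)), l.length ≤ fuel →
    PySem.Chars.splitOn.go ['0'] fuel l cur acc = acc.reverse ++ mySplit cur.reverse l := by
  induction fuel with
  | zero =>
    intro l cur acc h
    have hl : l = [] := by cases l <;> simp_all
    subst hl
    rw [PySem.Chars.splitOn.go.eq_def]
    simp [mySplit]
  | succ fuel ih =>
    intro l cur acc h
    cases l with
    | nil =>
      rw [PySem.Chars.splitOn.go.eq_def]
      simp [mySplit]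
    | cons c rest =>
      rw [PySem.Chars.splitOn.go.eq_def]
      simp only [List.isPrefixOf, List.isPrefixOf_nil_left, Bool.and_true]
      by_cases hc : c = '0'
      · subst hc
        have hdrop : List.drop (['0'] : List Char).length ('0' :: rest) = rest := rfl
        rw [if_pos (by decide : (('0':Char) == '0') = true), hdrop, ih rest [] (cur.reverse :: acc) (by simpa using h)]
        simp [mySplit]
      · have hbeq : ('0' == c) = false := beq_eq_false_iff_ne.mpr (fun h' => hc h'.symm)
        simp only [hbeq, Bool.false_eq_true, if_false]
        rw [ih rest (c :: cur) acc (by simpa using h)]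
        simp [mySplit, hc]

lemma splitOn_eq_mySplit (l : List Char) :
    PySem.Chars.splitOn l ['0'] = mySplit [] l := by
  unfold PySem.Chars.splitOn
  rw [go_eq (l.length + 1) l [] [] (by omega)]
  simp

lemma join_mySplit (l : List Char) : ∀ pre : List Char,
    PySem.Chars.join [' '] ((mySplit pre l).map (fun r => List.replicate r.length '#'))
      = List.replicate pre.length '#' ++ l.map decChar := by
  induction l with
  | nil =>
    intro pre
    simp [mySplit, PySem.Chars.join_singleton]
  | cons c t ih =>
    intro pre
    by_cases hc : c = '0'
    · subst hc
      rw [show mySplit pre ('0' :: t) = pre :: mySplit [] t from by simp [mySplit]]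
      obtain ⟨q, qs, hq⟩ : ∃ q qs, mySplit ([] : List Char) t = q :: qs := by
        cases h : mySplit ([] : List Char) t with
        | nil => exact absurd h (mySplit_ne_nil [] t)
        | cons q qs => exact ⟨q, qs, rfl⟩
      have iht := ih []
      rw [hq] at iht
      simp only [List.map_cons, List.length_nil, List.replicate_zero, List.nil_append] at iht
      rw [hq, List.map_cons, List.map_cons, PySem.Chars.join_cons_cons, iht]
      simp [decChar]
    · simp only [mySplit, if_neg hc]
      rw [ih (pre ++ [c])]
      have hdc : decChar c = '#' := by simp [decChar, hc]
      simp [hdc, List.replicate_succ' (n := pre.length)]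

lemma decode_eq (cs : List Char) :
    PySem.Chars.join [' ']
        ((PySem.Chars.splitOn cs ['0']).map (fun run => List.replicate run.length '#'))
      = cs.map decChar := by
  rw [splitOn_eq_mySplit, join_mySplit cs []]
  simp

lemma zfill_eq_rjust (cs : List Char) (w : Int)
    (h : ∀ c, cs.head? = some c → c ≠ '+' ∧ c ≠ '-') :
    PySem.Chars.zfill cs w = rjustChars cs w '0' := by
  unfold PySem.Chars.zfill rjustChars
  by_cases hw : w ≤ (cs.length : Int)
  · rw [if_pos hw]
    have h0 : (w - cs.length).toNat = 0 := by omega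
    simp [h0]
  · rw [if_neg hw]
    cases cs with
    | nil => simp
    | cons c rest =>
      have hc := h c rfl
      have hne : ¬ (c = '+' ∨ c = '-') := by tauto
      simp only [hne, if_false]
      have he : w.toNat - (c :: rest).length = (w - ((c :: rest).length : Int)).toNat := by
        simp only [List.length_cons] at *
        omega
      rw [he]

-- MSB-first binary digits, the shape `Nat.toDigitsCore 2` unfolds to
def binMSB (m : Nat) : List Char :=
  if h : m / 2 = 0 then [Nat.digitChar (m % 2)]
  else binMSB (m / 2) ++ [Nat.digitChar (m % 2)]
decreasing_by exact Nat.div_lt_self (by omega) (by omega)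

lemma toDigitsCore_two_eq : ∀ (f m : Nat) (acc : List Char), m < f →
    Nat.toDigitsCore 2 f m acc = binMSB m ++ acc := by
  intro f
  induction f with
  | zero => intro m acc h; omega
  | succ f ih =>
    intro m acc h
    rw [Nat.toDigitsCore, binMSB]
    by_cases h2 : m / 2 = 0
    · simp [h2]
    · simp only [h2, if_false, dif_neg h2]
      rw [ih (m / 2) _ (by omega)]
      simp

lemma toDigits_two_eq (m : Nat) : Nat.toDigits 2 m = binMSB m := by
  rw [Nat.toDigits, toDigitsCore_two_eq (m + 1) m [] (by omega)]
  simp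

lemma binMSB_mem (m : Nat) : ∀ c ∈ binMSB m, c = '0' ∨ c = '1' := by
  induction m using Nat.strong_induction_on with
  | _ m ih =>
    intro c hc
    rw [binMSB] at hc
    have hdig : Nat.digitChar (m % 2) = '0' ∨ Nat.digitChar (m % 2) = '1' := by
      rcases Nat.mod_two_eq_zero_or_one m with h | h <;> rw [h]
      · left; rfl
      · right; rfl
    by_cases h2 : m / 2 = 0
    · rw [dif_pos h2] at hc
      rcases List.mem_singleton.mp hc with h
      subst h; exact hdig
    · rw [dif_neg h2] at hc
      rcases List.mem_append.mp hc with h | h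
      · exact ih (m / 2) (Nat.div_lt_self (by omega) (by omega)) c h
      · rcases List.mem_singleton.mp h with h
        subst h; exact hdig

lemma binSlice_head (v : Int) :
    ∀ c, (PySem.List.slice (PySem.Int.toBinChars0b v) (some 2) none).head? = some c →
      c ≠ '+' ∧ c ≠ '-' := by
  intro c hc
  rw [PySem.List.slice_from _ (by omega : (0:Int) ≤ 2)] at hc
  unfold PySem.Int.toBinChars0b at hc
  by_cases hv : v < 0
  · rw [if_pos hv] at hc
    simp only [show ((2:Int)).toNat = 2 from rfl, List.drop_succ_cons, List.drop_zero, List.drop] at hc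
    rw [List.head?_cons] at hc
    cases hc
    exact ⟨by decide, by decide⟩
  · rw [if_neg hv] at hc
    simp only [show ((2:Int)).toNat = 2 from rfl, List.drop_succ_cons, List.drop_zero, List.drop] at hc
    have hmem : c ∈ Nat.toDigits 2 v.toNat := List.mem_of_mem_head? hc
    rw [toDigits_two_eq] at hmem
    rcases binMSB_mem v.toNat c hmem with h | h <;> subst h <;> exact ⟨by decide, by decide⟩

-- ===== VERDICT (by name: the statement is the Claim_ definition above) =====
theorem solution_spec : Claim_equal_solution := by
  intro n arr1 arr2 _hdom _hpre
  unfold Spec_solution solution solution_alt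
  apply List.map_congr_left
  intro i _hi
  apply congrArg String.ofList
  rw [zfill_eq_rjust _ n (binSlice_head _), decode_eq]
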